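-- pv_equiv track=rewrite | github.com/KevRojo/Dulus | display_blocks.py | _render_bg_task_telegram
-- ===== SOURCE A (Python) =====
-- def _render_bg_task_telegram(block: dict) -> str:
--     """Render a background task display block for Telegram."""
--     task_id = block.get("task_id", "?")
--     kind = block.get("kind", "?")
--     status = block.get("status", "?")
--     description = block.get("description", "")
--
--     icons = {
--         "running": "🔄",
--         "completed": "✅",
--         "failed": "❌",
--         "stopped": "🛑",
--     }
--     icon = icons.get(status, "❓")
--
--     def _esc(text: str) -> str:
--         for c in "_[]()~`>#+-=|{}.!":
--             text = text.replace(c, f"\\{c}")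
--         return text
--
--     return f"{icon} *Task `{task_id}`*\n{_esc(description)}\n({_esc(kind)}, {_esc(status)})"
-- ===== SOURCE B (Python) =====
-- # Different decomposition: branch chain for the icon, a single left-to-right
-- # character scan with an explicit accumulator for escaping (instead of 16
-- # whole-string replace passes), and the message assembled as joined lines.
--
-- _SPECIALS = frozenset("_[]()~`>#+-=|{}.!")
--
--
-- def _esc(text: str) -> str:
--     out = []
--     for ch in text:
--         if ch in _SPECIALS:
--             out.append("\\")
--         out.append(ch)
--     return "".join(out)
--
--
-- def _render_bg_task_telegram(block: dict) -> str:
--     """Render a background task display block for Telegram."""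
--     task_id = block.get("task_id", "?")
--     kind = block.get("kind", "?")
--     status = block.get("status", "?")
--     description = block.get("description", "")
--
--     icon = (
--         "\U0001F504" if status == "running"
--         else "\u2705" if status == "completed"
--         else "\u274C" if status == "failed"
--         else "\U0001F6D1" if status == "stopped"
--         else "\u2753"
--     )
--
--     lines = [
--         f"{icon} *Task `{task_id}`*",
--         _esc(description),
--         f"({_esc(kind)}, {_esc(status)})",
--     ]
--     return "\n".join(lines)
-- ===== Notes on version B (the rewrite author's own statement) =====
-- stated objective: alternative
-- what changed: The escaper's 16 sequential whole-string replace passes become one left-to-right character scan with an explicit accumulator (prepend a backslash when the character is special), the icon dict lookup becomes a conditional branch chain, and the message is assembled by joining a list of lines instead of one f-string.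
import Mathlib
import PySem

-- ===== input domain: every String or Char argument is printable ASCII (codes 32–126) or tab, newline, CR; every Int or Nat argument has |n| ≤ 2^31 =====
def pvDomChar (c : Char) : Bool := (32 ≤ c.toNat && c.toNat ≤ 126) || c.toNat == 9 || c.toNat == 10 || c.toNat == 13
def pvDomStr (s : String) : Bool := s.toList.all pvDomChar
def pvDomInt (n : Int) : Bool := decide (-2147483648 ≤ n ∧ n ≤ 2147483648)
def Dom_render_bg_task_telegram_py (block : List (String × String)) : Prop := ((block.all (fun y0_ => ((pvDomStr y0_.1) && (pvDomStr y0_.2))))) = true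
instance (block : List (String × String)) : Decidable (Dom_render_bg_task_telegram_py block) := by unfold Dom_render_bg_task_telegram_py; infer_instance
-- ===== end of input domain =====

-- B replaces _esc's 16 sequential whole-string replace passes with one left-to-right
-- character scan carrying an explicit accumulator, the icon dict lookup with a branch
-- chain, and the single f-string with a join of the three lines.

-- ===== PORT A =====
-- block.get(k, dflt): first-match association-list lookup (the dict convention)
def bgGet (block : List (String × String)) (k dflt : String) : String :=
  (PySem.Dict.mk block).getD k dflt

-- the `icons` dict literal of A
def bgIcons : PySem.Dict String String :=
  PySem.Dict.mk [("running", "🔄"), ("completed", "✅"), ("failed", "❌"), ("stopped", "🛑")]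

-- _esc: for c in "_[]()~`>#+-=|{}.!": text = text.replace(c, "\" + c)
def escA (text : String) : String :=
  "_[]()~`>#+-=|{}.!".toList.foldl
    (fun t c => PySem.Str.replace t (String.ofList [c]) (String.ofList ['\\', c])) text

def render_bg_task_telegram_py (block : List (String × String)) : String :=
  let task_id := bgGet block "task_id" "?"
  let kind := bgGet block "kind" "?"
  let status := bgGet block "status" "?"
  let description := bgGet block "description" ""
  let icon := bgIcons.getD status "❓"
  icon ++ " *Task `" ++ task_id ++ "`*\n" ++ escA description ++ "\n(" ++
    escA kind ++ ", " ++ escA status ++ ")"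

-- ===== PORT B =====
-- _esc of Source B: one pass appending to an accumulator ('out'), then "".join(out);
-- every appended piece is a single character, so 'out' is kept as a List Char
def escB (text : String) : String :=
  String.ofList
    ((text.toList.foldl
      (fun out ch =>
        if "_[]()~`>#+-=|{}.!".toList.contains ch then ch :: '\\' :: out else ch :: out)
      []).reverse)

-- the conditional branch chain for the icon
def iconB (status : String) : String :=
  if status == "running" then "🔄"
  else if status == "completed" then "✅"
  else if status == "failed" then "❌"
  else if status == "stopped" then "🛑"
  else "❓"

def render_bg_task_telegram_py_alt (block : List (String × String)) : String :=
  let task_id := bgGet block "task_id" "?"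
  let kind := bgGet block "kind" "?"
  let status := bgGet block "status" "?"
  let description := bgGet block "description" ""
  let icon := iconB status
  PySem.Str.join "\n"
    [icon ++ " *Task `" ++ task_id ++ "`*",
     escB description,
     "(" ++ escB kind ++ ", " ++ escB status ++ ")"]

-- ===== PRECONDITION & SPEC =====
def Spec_render_bg_task_telegram_py (block : List (String × String)) (out : String) : Prop := out = render_bg_task_telegram_py_alt block
instance (block : List (String × String)) (out : String) : Decidable (Spec_render_bg_task_telegram_py block out) := by unfold Spec_render_bg_task_telegram_py; infer_instance

-- ===== CLAIM (what is proved, stated in full; the proofs are below) =====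
def Claim_equal_render_bg_task_telegram_py : Prop := ∀ (block : List (String × String)), Dom_render_bg_task_telegram_py block → Spec_render_bg_task_telegram_py block (render_bg_task_telegram_py block)

-- ===== LEMMAS AND PROOFS =====

-- replace.go with a single-char pattern acts per character
theorem go_single (c : Char) (nw : List Char) :
    ∀ (l : List Char) (fuel : Nat) (acc : List Char), l.length ≤ fuel →
      PySem.Chars.replace.go [c] nw fuel l acc =
        acc.reverse ++ l.flatMap (fun x => if x = c then nw else [x]) := by
  intro l
  induction l with
  | nil =>
      intro fuel acc _
      cases fuel <;> simp [PySem.Chars.replace.go]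
  | cons x t ih =>
      intro fuel acc hf
      cases fuel with
      | zero => simp at hf
      | succ fuel =>
        rw [PySem.Chars.replace.go.eq_def]
        dsimp only
        by_cases hx : x = c
        · subst hx
          rw [if_pos (by simp [List.isPrefixOf] : List.isPrefixOf [x] (x :: t) = true)]
          have ht : t.length ≤ fuel := by simp at hf; omega
          simp only [List.length_cons, List.length_nil, Nat.zero_add, List.drop_succ_cons,
            List.drop_zero]
          rw [ih fuel (nw.reverse ++ acc) ht]
          simp
        · rw [if_neg (by simp [List.isPrefixOf, Ne.symm hx] :
            ¬ (List.isPrefixOf [c] (x :: t) = true))]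
          have ht : t.length ≤ fuel := by simp at hf; omega
          rw [ih fuel (x :: acc) ht]
          simp [hx]

-- single-char replace is a flatMap
theorem replace_single (l : List Char) (c : Char) (nw : List Char) :
    PySem.Chars.replace l [c] nw = l.flatMap (fun x => if x = c then nw else [x]) := by
  unfold PySem.Chars.replace
  rw [if_neg (by simp : ¬ (List.isEmpty [c] = true))]
  rw [go_single c nw l l.length [] (le_refl _)]
  simp

-- a pipeline of per-character escape passes, over distinct specials not containing
-- the backslash, equals one single pass over the whole escape set
theorem pipe (cs : List Char) (hb : '\\' ∉ cs) (hn : cs.Nodup) :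
    ∀ l : List Char,
      cs.foldl (fun t c => t.flatMap (fun x => if x = c then ['\\', c] else [x])) l =
        l.flatMap (fun x => if cs.contains x then ['\\', x] else [x]) := by
  induction cs with
  | nil => intro l; simp
  | cons c rest ih =>
      intro l
      have hbr : '\\' ∉ rest := fun h => hb (List.mem_cons_of_mem _ h)
      have hcr : c ∉ rest := (List.nodup_cons.mp hn).1
      have hnr : rest.Nodup := (List.nodup_cons.mp hn).2
      simp only [List.foldl_cons]
      rw [ih hbr hnr, List.flatMap_assoc]
      apply List.flatMap_congr
      intro x _
      by_cases hx : x = c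
      · subst hx
        simp [List.contains_eq_mem, hbr, hcr]
      · simp only [if_neg hx, List.flatMap_cons, List.flatMap_nil, List.append_nil,
          List.contains_eq_mem, List.mem_cons]
        simp [hx]

-- bridge the String-level A pipeline to the list-level pipeline
theorem escA_foldl (cs : List Char) (t : String) :
    cs.foldl (fun t c => PySem.Str.replace t (String.ofList [c]) (String.ofList ['\\', c])) t =
      String.ofList (cs.foldl
        (fun l c => l.flatMap (fun x => if x = c then ['\\', c] else [x])) t.toList) := by
  induction cs generalizing t with
  | nil => simp
  | cons c rest ih =>
      simp only [List.foldl_cons]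
      rw [ih]
      congr 1
      have : (PySem.Str.replace t (String.ofList [c]) (String.ofList ['\\', c])).toList =
          t.toList.flatMap (fun x => if x = c then ['\\', c] else [x]) := by
        rw [PySem.Str.toList_replace]
        simp only [String.toList_ofList]
        exact replace_single t.toList c ['\\', c]
      rw [this]

-- B's accumulator scan, unreversed, is the single-pass flatMap
theorem escB_scan (specials : List Char) :
    ∀ (l acc : List Char),
      (l.foldl (fun out ch =>
          if specials.contains ch then ch :: '\\' :: out else ch :: out) acc).reverse =
        acc.reverse ++ l.flatMap (fun x => if specials.contains x then ['\\', x] else [x]) := by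
  intro l
  induction l with
  | nil => intro acc; simp
  | cons x t ih =>
      intro acc
      simp only [List.foldl_cons, List.flatMap_cons]
      by_cases hx : specials.contains x = true
      · rw [if_pos hx, ih]; simp at hx; simp [hx]
      · rw [if_neg hx, ih]; simp at hx; simp [hx]

theorem escA_eq_escB (s : String) : escA s = escB s := by
  unfold escA escB
  rw [escA_foldl, escB_scan]
  rw [pipe _ (by decide) (by decide) s.toList]
  simp

-- the branch chain computes the icons-dict lookup
theorem iconB_eq (s : String) : bgIcons.getD s "❓" = iconB s := by
  unfold bgIcons iconB
  simp only [PySem.Dict.getD, PySem.Dict.get?, List.find?]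
  split_ifs with h1 h2 h3 h4
  · rw [show s = "running" from eq_of_beq h1]; decide
  · rw [show s = "completed" from eq_of_beq h2]; decide
  · rw [show s = "failed" from eq_of_beq h3]; decide
  · rw [show s = "stopped" from eq_of_beq h4]; decide
  · have ne : ∀ a : String, ¬(s == a) = true → ("running" = a ∨ "completed" = a ∨ "failed" = a ∨ "stopped" = a) → (a == s) = false := by
      intro a ha _
      simp only [beq_eq_false_iff_ne]
      intro h; exact ha (by simp [h])
    simp [ne _ h1 (Or.inl rfl), ne _ h2 (Or.inr (Or.inl rfl)),
      ne _ h3 (Or.inr (Or.inr (Or.inl rfl))), ne _ h4 (Or.inr (Or.inr (Or.inr rfl)))]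

-- joining the three lines is A's concatenation
theorem join_three (a b c : String) :
    PySem.Str.join "\n" [a, b, c] = a ++ "\n" ++ b ++ "\n" ++ c := by
  apply String.ext
  simp [PySem.Str.join, PySem.Chars.join, List.intercalate, List.intersperse]

-- ===== VERDICT (by name: the statement is the Claim_ definition above) =====
theorem render_bg_task_telegram_py_spec : Claim_equal_render_bg_task_telegram_py := by
  intro block _
  show render_bg_task_telegram_py block = render_bg_task_telegram_py_alt block
  unfold render_bg_task_telegram_py render_bg_task_telegram_py_alt
  rw [join_three, ← iconB_eq, show escA = escB from funext escA_eq_escB]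
  apply String.ext
  simp
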